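-- pv_equiv track=rewrite | github.com/utkarshpandey6/Report-buider | classes/report2.py | list_to_sentence
-- ===== SOURCE A (Python) =====
-- def list_to_sentence(li):
--     text = ""
--     length_of_li = len(li)
--     for i in range(0, length_of_li):
--         if i == 0:
--             text += li[i]
--         elif i == length_of_li - 1 and length_of_li > 1:
--             text += " and " + li[i]
--         else:
--             text += ", " + li[i]
--     return text
-- ===== SOURCE B (Python) =====
-- def list_to_sentence(li):
--     if not li:
--         return ""
--     if len(li) == 1:
--         return "" + li[0]
--     return ", ".join(li[:-1]) + " and " + li[-1]
-- ===== Notes on version B (the rewrite author's own statement) =====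
-- stated objective: simpler
-- what changed: Replaces the index-based loop with three positional branches by a structural split: join all but the last element with ", " and append " and " plus the last element.
import Mathlib
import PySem

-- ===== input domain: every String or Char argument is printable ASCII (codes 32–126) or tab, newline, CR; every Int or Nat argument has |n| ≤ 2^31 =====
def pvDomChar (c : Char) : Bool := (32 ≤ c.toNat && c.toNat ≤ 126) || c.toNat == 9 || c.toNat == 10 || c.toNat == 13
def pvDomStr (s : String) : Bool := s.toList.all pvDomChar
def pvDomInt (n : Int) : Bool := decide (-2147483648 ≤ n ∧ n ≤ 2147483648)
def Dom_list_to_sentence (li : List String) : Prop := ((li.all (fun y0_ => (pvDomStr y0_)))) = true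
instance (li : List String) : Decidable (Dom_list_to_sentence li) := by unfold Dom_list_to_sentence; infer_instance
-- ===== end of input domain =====

-- B replaces A's index-based loop (three positional branches) by a structural split:
-- join all but the last element with ", ", then append " and " plus the last element (simpler decomposition, same cost).


-- ===== PORT A =====
def list_to_sentence (li : List String) : String :=
  let lengthOfLi : Int := PySem.List.len li
  (PySem.List.pyRange 0 lengthOfLi 1).foldl
    (fun text i =>
      if i == 0 then text ++ PySem.List.pyGetD li i ""
      else if i == lengthOfLi - 1 && decide (lengthOfLi > 1) then
        text ++ (" and " ++ PySem.List.pyGetD li i "")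
      else text ++ (", " ++ PySem.List.pyGetD li i ""))
    ""

-- ===== PORT B =====
def list_to_sentence_alt (li : List String) : String :=
  if li = [] then ""
  else if PySem.List.len li == 1 then "" ++ PySem.List.pyGetD li 0 ""
  else
    PySem.Str.join ", " (PySem.List.slice li none (some (-1))) ++ " and "
      ++ PySem.List.pyGetD li (-1) ""

-- ===== PRECONDITION & SPEC =====
def Spec_list_to_sentence (li : List String) (out : String) : Prop := out = list_to_sentence_alt li
instance (li : List String) (out : String) : Decidable (Spec_list_to_sentence li out) := by unfold Spec_list_to_sentence; infer_instance

-- ===== CLAIM (what is proved, stated in full; the proofs are below) =====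
def Claim_equal_list_to_sentence : Prop := ∀ (li : List String), Dom_list_to_sentence li → Spec_list_to_sentence li (list_to_sentence li)

-- ===== LEMMAS AND PROOFS =====

-- the loop body of A, with the index/value pair made explicit
def pvF (n : Int) (text : String) (p : Int × String) : String :=
  if p.1 == 0 then text ++ p.2
  else if p.1 == n - 1 && decide (n > 1) then text ++ (" and " ++ p.2)
  else text ++ (", " ++ p.2)

-- ", "-prefixed concatenation of the middle elements
def pvMid : List String → String
  | [] => ""
  | m :: ms => ", " ++ m ++ pvMid ms

theorem pvA_eq_enum (li : List String) :
    list_to_sentence li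
      = (PySem.List.enumerate li).foldl (pvF (PySem.List.len li)) "" := by
  unfold list_to_sentence pvF
  rw [PySem.List.enumerate_eq_map_pyRange li "", List.foldl_map]

theorem pv_loop_tail (n : Int) (z : String) :
    ∀ (xs : List String) (i : Int) (t : String),
      1 ≤ i → i + xs.length + 1 = n →
      (PySem.List.enumerate (xs ++ [z]) i).foldl (pvF n) t
        = t ++ pvMid xs ++ (" and " ++ z) := by
  intro xs
  induction xs with
  | nil =>
      intro i t hi hn
      have h0 : (i == 0) = false := by simp; omega
      have h1 : (i == n - 1 && decide (n > 1)) = true := by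
        simp at hn ⊢; omega
      simp [PySem.List.enumerate, pvF, h0, h1, pvMid]
  | cons m ms ih =>
      intro i t hi hn
      have h0 : (i == 0) = false := by simp; omega
      have h1 : (i == n - 1 && decide (n > 1)) = false := by
        simp at hn ⊢
        intro h; omega
      have : PySem.List.enumerate ((m :: ms) ++ [z]) i
          = (i, m) :: PySem.List.enumerate (ms ++ [z]) (i + 1) := by
        simp
      rw [this, List.foldl_cons]
      have hstep : pvF n t (i, m) = t ++ (", " ++ m) := by
        simp [pvF, h0, h1]
      rw [hstep, ih (i + 1) (t ++ (", " ++ m)) (by omega) (by simp at hn ⊢; omega)]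
      apply String.toList_inj.mp
      simp [pvMid]

theorem pv_join_eq_mid (x : String) (ms : List String) :
    (PySem.Str.join ", " (x :: ms)).toList = x.toList ++ (pvMid ms).toList := by
  induction ms generalizing x with
  | nil => simp [PySem.Str.toList_join, PySem.Chars.join_singleton, pvMid]
  | cons m ms ih =>
      have h := ih m
      rw [PySem.Str.toList_join] at h ⊢
      simp only [List.map_cons] at h ⊢
      rw [PySem.Chars.join_cons_cons, h]
      simp [pvMid]

-- ===== VERDICT (by name: the statement is the Claim_ definition above) =====
theorem list_to_sentence_spec : Claim_equal_list_to_sentence := by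
  intro li _
  unfold Spec_list_to_sentence
  match li with
  | [] => rfl
  | [x] =>
      rw [pvA_eq_enum]
      simp [PySem.List.enumerate, pvF, list_to_sentence_alt, PySem.List.len,
        PySem.List.pyGetD]
  | x :: y :: rest =>
      have hne : (y :: rest) ≠ [] := by simp
      have hsplit : y :: rest
          = (y :: rest).dropLast ++ [(y :: rest).getLast hne] :=
        (List.dropLast_append_getLast hne).symm
      rw [pvA_eq_enum]
      have henum : PySem.List.enumerate (x :: y :: rest) 0
          = (0, x) :: PySem.List.enumerate (y :: rest) 1 := by
        simp [PySem.List.enumerate]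

      rw [henum, List.foldl_cons]
      have hstep : pvF (PySem.List.len (x :: y :: rest)) "" (0, x) = "" ++ x := by
        simp [pvF]
      rw [hstep]
      rw [show PySem.List.enumerate (y :: rest) 1
            = PySem.List.enumerate ((y :: rest).dropLast
                ++ [(y :: rest).getLast hne]) 1 by rw [← hsplit]]
      rw [pv_loop_tail (PySem.List.len (x :: y :: rest)) ((y :: rest).getLast hne)
            (y :: rest).dropLast 1 ("" ++ x) (by omega)
            (by simp [PySem.List.len]; omega)]
      -- now the B side
      have hB : list_to_sentence_alt (x :: y :: rest)
          = PySem.Str.join ", " (x :: (y :: rest).dropLast) ++ " and "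
              ++ (y :: rest).getLast hne := by
        have hlen : (PySem.List.len (x :: y :: rest) == 1) = false := by
          simp [PySem.List.len]; omega
        rw [list_to_sentence_alt]
        rw [if_neg (by simp), hlen, PySem.List.slice_to_neg_one,
          PySem.List.pyGetD_neg_one _ _ (by simp)]
        simp [List.getLast_cons]
      rw [hB]
      apply String.toList_inj.mp
      have hj := pv_join_eq_mid x (y :: rest).dropLast
      simp only [String.toList_append, hj]
      simp
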